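-- pv_equiv track=rewrite | github.com/ElectrixFox/GJ-Haskell | pseudocode.py | Ars
-- ===== SOURCE A (Python) =====
-- def Ars(m, r, s, lam):
--     tm = [lam * x for x in m[r - 1]]
--     resm = []
--     for i in range(0, len(m)):
--         if i == s - 1:
--             resm += [[m[s - 1][p] + tm[p] for p in range(len(tm))]]
--         else:
--             resm += [m[i]]
--     return resm
-- ===== SOURCE B (Python) =====
-- def Ars(m, r, s, lam):
--     src = m[r - 1]
--
--     def go(rows, k):
--         if not rows:
--             return []
--         if k == 0:
--             return [[a + lam * b for a, b in zip(rows[0], src)]] + go(rows[1:], k - 1)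
--         return [rows[0]] + go(rows[1:], k - 1)
--
--     return go(m, s - 1)
-- ===== Notes on version B (the rewrite author's own statement) =====
-- stated objective: alternative
-- what changed: B is a structural recursion on the row list with a countdown counter (combining the head with the source row exactly when the counter hits zero), replacing A's index loop over range(len(m)) with its per-iteration i==s-1 test and the separately precomputed scaled list tm; on inputs where row s-1 is strictly longer than row r-1, A raises IndexError while B returns the zip-truncated row, so Pre_ excludes those.
import Mathlib
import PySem

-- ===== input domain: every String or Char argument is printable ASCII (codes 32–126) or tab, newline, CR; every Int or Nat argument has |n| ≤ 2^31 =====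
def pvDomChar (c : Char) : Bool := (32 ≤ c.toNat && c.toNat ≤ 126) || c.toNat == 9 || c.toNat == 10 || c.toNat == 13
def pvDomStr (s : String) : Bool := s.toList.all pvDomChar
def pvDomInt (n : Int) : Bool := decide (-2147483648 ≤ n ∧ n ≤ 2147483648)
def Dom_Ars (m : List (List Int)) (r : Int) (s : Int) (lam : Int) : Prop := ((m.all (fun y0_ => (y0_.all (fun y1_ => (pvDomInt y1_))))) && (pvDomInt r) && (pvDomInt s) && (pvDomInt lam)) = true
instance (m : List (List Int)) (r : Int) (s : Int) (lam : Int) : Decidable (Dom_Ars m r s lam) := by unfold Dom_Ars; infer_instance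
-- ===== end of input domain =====

-- B rebuilds the matrix by structural recursion with a countdown counter instead of
-- A's index loop with an i == s-1 test and precomputed scaled list (objective: alternative).
-- Equivalence is about the return value; neither program mutates its arguments.

-- ===== PORT A =====
def Ars (m : List (List Int)) (r : Int) (s : Int) (lam : Int) : List (List Int) :=
  let tm := ((PySem.List.pyGet? m (r - 1)).getD []).map (fun x => lam * x)
  (PySem.List.pyRange 0 (m.length : Int) 1).foldl
    (fun resm i =>
      if i = s - 1 then
        resm ++ [(PySem.List.pyRange 0 (tm.length : Int) 1).map
          (fun p => PySem.List.pyGetD ((PySem.List.pyGet? m (s - 1)).getD []) p 0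
                    + PySem.List.pyGetD tm p 0)]
      else
        resm ++ [PySem.List.pyGetD m i []]) []

-- ===== PORT B =====
-- go(rows, k): structural recursion on the row list, combining the head with src when k hits 0
def ArsGo (src : List Int) (lam : Int) : List (List Int) → Int → List (List Int)
  | [], _ => []
  | row :: rest, k =>
    if k = 0 then ((row.zip src).map (fun ab => ab.1 + lam * ab.2)) :: ArsGo src lam rest (k - 1)
    else row :: ArsGo src lam rest (k - 1)

def Ars_alt (m : List (List Int)) (r : Int) (s : Int) (lam : Int) : List (List Int) :=
  let src := (PySem.List.pyGet? m (r - 1)).getD []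
  ArsGo src lam m (s - 1)

-- ===== PRECONDITION & SPEC =====
-- Pre_ excludes exactly the inputs on which A raises: r-1 not a valid (possibly
-- negative) index of m (IndexError on m[r-1]), or row s-1 shorter than row r-1
-- (IndexError on m[s-1][p]); A returns no value there.
def Pre_Ars (m : List (List Int)) (r : Int) (s : Int) (lam : Int) : Prop :=
  PySem.Raise.InRange m.length (r - 1) ∧
  (1 ≤ s → s ≤ (m.length : Int) →
    ((PySem.List.pyGet? m (r - 1)).getD []).length ≤ ((PySem.List.pyGet? m (s - 1)).getD []).length)
instance (m : List (List Int)) (r : Int) (s : Int) (lam : Int) : Decidable (Pre_Ars m r s lam) := by unfold Pre_Ars; infer_instance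

def pvWitness_Ars : List (List Int) × Int × Int × Int := ([[1, 2], [3, 4]], 1, 2, 5)

def Spec_Ars (m : List (List Int)) (r : Int) (s : Int) (lam : Int) (out : List (List Int)) : Prop := out = Ars_alt m r s lam
instance (m : List (List Int)) (r : Int) (s : Int) (lam : Int) (out : List (List Int)) : Decidable (Spec_Ars m r s lam out) := by unfold Spec_Ars; infer_instance

-- ===== CLAIM (what is proved, stated in full; the proofs are below) =====
def Claim_equal_Ars : Prop := ∀ (m : List (List Int)) (r : Int) (s : Int) (lam : Int), Dom_Ars m r s lam → Pre_Ars m r s lam → Spec_Ars m r s lam (Ars m r s lam)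

-- ===== LEMMAS AND PROOFS =====

-- loop shape of A: append one row per index, the row depending on an if
theorem foldl_append_singleton_ite {α β : Type} (p : α → Prop) [DecidablePred p]
    (f g : α → β) (l : List α) (acc : List β) :
    l.foldl (fun acc x => if p x then acc ++ [f x] else acc ++ [g x]) acc
      = acc ++ l.map (fun x => if p x then f x else g x) := by
  induction l generalizing acc with
  | nil => simp
  | cons a t ih =>
      simp only [List.foldl_cons, List.map_cons]
      by_cases h : p a <;> simp [h, ih, List.append_assoc]

theorem Ars_eq_map (m : List (List Int)) (r s lam : Int) :
    Ars m r s lam =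
      (List.range m.length).map (fun (k : Nat) =>
        if (k : Int) = s - 1 then
          (List.range ((PySem.List.pyGet? m (r - 1)).getD []).length).map (fun (p : Nat) =>
            ((PySem.List.pyGet? m (s - 1)).getD []).getD p 0
              + lam * ((PySem.List.pyGet? m (r - 1)).getD []).getD p 0)
        else m.getD k []) := by
  unfold Ars
  rw [foldl_append_singleton_ite (fun i => i = s - 1)]
  rw [PySem.List.pyRange_one, PySem.List.pyRange_one]
  simp only [Int.sub_zero, Int.toNat_natCast, List.map_map, List.nil_append, List.length_map]
  apply List.map_congr_left
  intro k hk
  have hk' : k < m.length := List.mem_range.mp hk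
  simp only [Function.comp_def, zero_add]
  by_cases hks : (k : Int) = s - 1
  · rw [if_pos hks, if_pos hks]
    apply List.map_congr_left
    intro p hp
    have hp' := List.mem_range.mp hp
    simp [PySem.List.pyGetD_natCast, List.getD_eq_getElem?_getD, hp']
  · rw [if_neg hks, if_neg hks]
    simp [PySem.List.pyGetD_natCast]

-- B's recursion as a positional map
theorem ArsGo_eq_map (src : List Int) (lam : Int) (m : List (List Int)) (k : Int) :
    ArsGo src lam m k =
      (List.range m.length).map (fun (i : Nat) =>
        if (i : Int) = k then ((m.getD i []).zip src).map (fun ab => ab.1 + lam * ab.2)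
        else m.getD i []) := by
  induction m generalizing k with
  | nil => simp [ArsGo]
  | cons a t ih =>
      rw [show (a :: t).length = t.length + 1 from rfl, List.range_succ_eq_map]
      simp only [ArsGo, List.map_cons, List.map_map, Nat.cast_zero]
      by_cases h0 : k = 0
      · subst h0
        rw [if_pos rfl, if_pos rfl, ih]
        congr 1
      · rw [if_neg h0, if_neg (by omega), ih]
        congr 1
        apply List.map_congr_left
        intro i _
        simp only [Function.comp_def, List.getD_cons_succ]
        by_cases hi : (i : Int) = k - 1
        · rw [if_pos hi, if_pos (by omega)]
        · rw [if_neg hi, if_neg (by omega)]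

theorem Ars_spec : Claim_equal_Ars := by
  intro m r s lam _ hpre
  obtain ⟨hr, hs⟩ := hpre
  show Ars m r s lam = Ars_alt m r s lam
  rw [Ars_eq_map]
  unfold Ars_alt
  rw [ArsGo_eq_map]
  apply List.map_congr_left
  intro k hk
  have hk' : k < m.length := List.mem_range.mp hk
  by_cases hks : (k : Int) = s - 1
  · rw [if_pos hks, if_pos hks]
    have hsval : 1 ≤ s ∧ s ≤ (m.length : Int) := by omega
    have hlen := hs hsval.1 hsval.2
    set src := (PySem.List.pyGet? m (r - 1)).getD [] with hsrc
    have htgt : (PySem.List.pyGet? m (s - 1)).getD [] = m.getD k [] := by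
      rw [show s - 1 = ((k : Nat) : Int) from hks.symm, PySem.List.pyGet?_natCast]
      simp [List.getD_eq_getElem?_getD, hk']
    rw [htgt] at hlen
    set target := m.getD k [] with htgtdef
    rw [htgt]
    apply List.ext_getElem
    · simp only [List.length_map, List.length_range, List.length_zip]
      omega
    · intro p hp1 hp2
      simp only [List.length_map, List.length_range] at hp1
      rw [List.getElem_map, List.getElem_range, List.getElem_map, List.getElem_zip]
      have hpt : p < target.length := by omega
      simp [List.getD_eq_getElem?_getD, hp1, hpt]
  · rw [if_neg hks, if_neg hks]
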